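-- pv_equiv track=rewrite | github.com/petteriTeikari/deep-biblio-tools | scripts/rename_files.py | get_new_filename
-- ===== SOURCE A (Python) =====
-- def get_new_filename(filename: str) -> str:
--     """Convert filename to follow conventions."""
--     # Special cases that should keep their format
--     if filename in [
--         "__init__.py",
--         "__main__.py",
--         "README.md",
--         "README",
--         "CHANGELOG.md",
--         "CHANGELOG",
--         "CLAUDE.md",
--         "LICENSE",
--         "LICENSE.md",
--         "Makefile",
--     ]:
--         return filename
--
--     # Convert to lowercase and replace underscores
--     new_name = filename.lower().replace("_", "-")
--
--     # Handle camelCase without regex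
--     result = []
--     for i, char in enumerate(new_name):
--         if i > 0 and char.isupper() and new_name[i - 1].islower():
--             result.append("-")
--         result.append(char.lower())
--     new_name = "".join(result)
--
--     # Remove duplicate hyphens
--     while "--" in new_name:
--         new_name = new_name.replace("--", "-")
--
--     return new_name
-- ===== SOURCE B (Python) =====
-- SPECIAL_NAMES = {
--     "__init__.py",
--     "__main__.py",
--     "README.md",
--     "README",
--     "CHANGELOG.md",
--     "CHANGELOG",
--     "CLAUDE.md",
--     "LICENSE",
--     "LICENSE.md",
--     "Makefile",
-- }
--
--
-- def get_new_filename(filename: str) -> str: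
--     """Convert filename to follow conventions."""
--     if filename in SPECIAL_NAMES:
--         return filename
--
--     name = filename.lower().replace("_", "-")
--
--     # Collapse consecutive hyphens in a single pass.
--     out = []
--     prev_hyphen = False
--     for ch in name:
--         if ch == "-" and prev_hyphen:
--             continue
--         out.append(ch)
--         prev_hyphen = ch == "-"
--     return "".join(out)
-- ===== Notes on version B (the rewrite author's own statement) =====
-- stated objective: faster
-- what changed: Replaces A's dead camelCase pass plus its repeated whole-string duplicate-hyphen replace loop with a single left-to-right pass that skips a hyphen whenever the previously emitted character was already a hyphen.
import Mathlib
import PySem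

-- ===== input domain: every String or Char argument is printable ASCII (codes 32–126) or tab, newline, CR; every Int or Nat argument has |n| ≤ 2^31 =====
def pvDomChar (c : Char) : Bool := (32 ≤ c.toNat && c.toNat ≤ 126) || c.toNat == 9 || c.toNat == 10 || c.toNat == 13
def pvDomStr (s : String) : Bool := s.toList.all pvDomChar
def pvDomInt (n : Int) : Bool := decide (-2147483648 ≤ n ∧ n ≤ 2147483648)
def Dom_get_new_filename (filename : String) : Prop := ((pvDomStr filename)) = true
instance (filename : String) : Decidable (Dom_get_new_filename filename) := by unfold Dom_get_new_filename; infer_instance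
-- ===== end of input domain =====

-- B replaces A's dead camelCase pass and repeated duplicate-hyphen replace loop by one
-- linear pass that skips a hyphen when the previously emitted character was a hyphen (faster).

-- ===== PORT A =====
-- the special-case list of A
def pvSpecialNames : List String :=
  ["__init__.py", "__main__.py", "README.md", "README", "CHANGELOG.md",
   "CHANGELOG", "CLAUDE.md", "LICENSE", "LICENSE.md", "Makefile"]

-- One replace("--","-") step, as a structural recursion (used to characterise
-- PySem.Chars.replace and to justify termination of A's while loop).
def pvRepDD : List Char → List Char
  | [] => []
  | [c] => [c]
  | a :: b :: t => if a = '-' ∧ b = '-' then '-' :: pvRepDD t else a :: pvRepDD (b :: t)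

-- "--" occurs in the list (boolean form of the while-loop guard)
def pvDD : List Char → Bool
  | [] => false
  | [_] => false
  | a :: b :: t => (a = '-' && b = '-') || pvDD (b :: t)

theorem pvGo_dd_eq (fuel : Nat) (l acc : List Char) (h : l.length ≤ fuel) :
    PySem.Chars.replace.go ['-', '-'] ['-'] fuel l acc = acc.reverse ++ pvRepDD l := by
  induction fuel generalizing l acc with
  | zero =>
    have : l = [] := List.eq_nil_of_length_eq_zero (Nat.le_zero.mp h)
    subst this; simp [PySem.Chars.replace.go, pvRepDD]
  | succ fuel ih =>
    match l with
    | [] => simp [PySem.Chars.replace.go, pvRepDD]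
    | [c] =>
      by_cases hc : c = '-' <;>
        simp [PySem.Chars.replace.go, List.isPrefixOf, hc, pvRepDD, ih]
    | a :: b :: t =>
      by_cases ha : a = '-'
      · by_cases hb : b = '-'
        · subst ha; subst hb
          rw [PySem.Chars.replace.go]
          simp only [List.isPrefixOf, BEq.rfl, Bool.and_true, if_pos]
          rw [ih _ _ (by simp only [List.length_cons, List.length_drop] at h ⊢; omega)]
          simp [pvRepDD]
        · rw [PySem.Chars.replace.go]
          have hpre : List.isPrefixOf ['-', '-'] (a :: b :: t) = false := by
            simp only [List.isPrefixOf, Bool.and_true,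
              Bool.and_eq_false_iff, beq_eq_false_iff_ne, ne_eq]
            right; intro h'; exact hb h'.symm
          rw [hpre]
          simp only [Bool.false_eq_true, if_false]
          rw [ih _ _ (by simp only [List.length_cons] at h ⊢; omega)]
          simp [pvRepDD, ha, hb]
      · rw [PySem.Chars.replace.go]
        have hpre : List.isPrefixOf ['-', '-'] (a :: b :: t) = false := by
          simp only [List.isPrefixOf, Bool.and_true,
            Bool.and_eq_false_iff, beq_eq_false_iff_ne, ne_eq]
          left; intro h'; exact ha h'.symm
        rw [hpre]
        simp only [Bool.false_eq_true, if_false]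
        rw [ih _ _ (by simp only [List.length_cons] at h ⊢; omega)]
        simp [pvRepDD, ha]

theorem pvReplace_dd_eq (l : List Char) :
    PySem.Chars.replace l ['-', '-'] ['-'] = pvRepDD l := by
  rw [PySem.Chars.replace]
  simp only [List.isEmpty, Bool.false_eq_true, if_false]
  exact pvGo_dd_eq l.length l [] le_rfl

theorem pvRepDD_len_le (l : List Char) : (pvRepDD l).length ≤ l.length := by
  induction l using pvRepDD.induct with
  | case1 => simp [pvRepDD]
  | case2 c => simp [pvRepDD]
  | case3 a b t h ih => have := ih; simp [pvRepDD, h] at this ⊢; omega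
  | case4 a b t hab ih => simp [pvRepDD, hab]; simpa using ih

theorem pvRepDD_len_lt (l : List Char) (h : pvDD l = true) :
    (pvRepDD l).length < l.length := by
  induction l using pvRepDD.induct with
  | case1 => simp [pvDD] at h
  | case2 c => simp [pvDD] at h
  | case3 a b t hab ih =>
    obtain ⟨h1, h2⟩ := hab; subst h1; subst h2
    have := pvRepDD_len_le t
    simp only [pvRepDD, and_self, if_pos, List.length_cons]
    omega
  | case4 a b t hab ih =>
    have hdd : pvDD (b :: t) = true := by
      simp only [pvDD, Bool.or_eq_true, Bool.and_eq_true, decide_eq_true_eq] at h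
      rcases h with ⟨h1, h2⟩ | h'
      · exact absurd ⟨h1, h2⟩ hab
      · exact h'
    have := ih hdd
    simp only [List.length_cons] at this
    simp only [pvRepDD, hab, if_false, List.length_cons]
    omega

theorem pvDD_iff (l : List Char) : pvDD l = true ↔ ['-', '-'] <:+: l := by
  induction l using pvDD.induct with
  | case1 => simp [pvDD]
  | case2 c => simp [pvDD, List.infix_cons_iff, List.cons_prefix_cons]
  | case3 a b t ih =>
    simp only [pvDD, Bool.or_eq_true, Bool.and_eq_true, decide_eq_true_eq, ih,
      List.infix_cons_iff (a := a), List.cons_prefix_cons, List.nil_prefix, and_true]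
    constructor
    · rintro (⟨h1, h2⟩ | h)
      · exact Or.inl ⟨h1.symm, h2.symm⟩
      · exact Or.inr h
    · rintro (⟨h1, h2⟩ | h)
      · exact Or.inl ⟨h1.symm, h2.symm⟩
      · exact Or.inr h

theorem pvIsIn_dd (s : String) : PySem.Str.isIn "--" s = pvDD s.toList := by
  have h1 : PySem.Str.isIn "--" s = true ↔ ("--".toList <:+: s.toList) :=
    PySem.Str.isIn_iff_infix "--" s
  have h2 : "--".toList = ['-', '-'] := by decide
  rw [h2] at h1
  rw [Bool.eq_iff_iff, h1, pvDD_iff]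

theorem pvReplace_len_lt (s : String) (h : PySem.Str.isIn "--" s = true) :
    (PySem.Str.replace s "--" "-").toList.length < s.toList.length := by
  rw [PySem.Str.toList_replace]
  have h2 : "--".toList = ['-', '-'] := by decide
  have h3 : "-".toList = ['-'] := by decide
  rw [h2, h3, pvReplace_dd_eq]
  exact pvRepDD_len_lt _ (by rw [pvIsIn_dd] at h; exact h)

-- the 'while "--" in new_name' loop of A
def pvWhileRep (s : String) : String :=
  if h : PySem.Str.isIn "--" s = true then pvWhileRep (PySem.Str.replace s "--" "-") else s
termination_by s.toList.length
decreasing_by exact pvReplace_len_lt s h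

def get_new_filename (filename : String) : String :=
  if pvSpecialNames.contains filename then filename
  else
    let new_name := PySem.Str.replace (PySem.Str.lower filename) "_" "-"
    -- camelCase loop; new_name[i-1] is read only when i > 0, hence in range: the
    -- getD default is never used and the port is exact
    let result : List Char := (PySem.List.enumerate new_name.toList).foldl
      (fun acc p =>
        (if decide (p.1 > 0) && PySem.Chars.isupper p.2 &&
            PySem.Chars.islower ((PySem.List.pyGet? new_name.toList (p.1 - 1)).getD ' ')
         then acc ++ ['-'] else acc) ++ [PySem.Chars.lowerChar p.2]) []
    pvWhileRep (String.ofList result)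

-- ===== PORT B =====
def pvSpecialSet : PySem.Set String :=
  PySem.Set.ofList
    ["__init__.py", "__main__.py", "README.md", "README", "CHANGELOG.md",
     "CHANGELOG", "CLAUDE.md", "LICENSE", "LICENSE.md", "Makefile"]

def get_new_filename_alt (filename : String) : String :=
  if pvSpecialSet.contains filename then filename
  else
    let name := PySem.Str.replace (PySem.Str.lower filename) "_" "-"
    let st := name.toList.foldl
      (fun (st : List Char × Bool) ch =>
        if ch == '-' && st.2 then st else (st.1 ++ [ch], ch == '-'))
      ([], false)
    String.ofList st.1

-- ===== PRECONDITION & SPEC =====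
def Spec_get_new_filename (filename : String) (out : String) : Prop := out = get_new_filename_alt filename
instance (filename : String) (out : String) : Decidable (Spec_get_new_filename filename out) := by unfold Spec_get_new_filename; infer_instance

-- ===== CLAIM (what is proved, stated in full; the proofs are below) =====
def Claim_equal_get_new_filename : Prop := ∀ (filename : String), Dom_get_new_filename filename → Spec_get_new_filename filename (get_new_filename filename)

-- ===== LEMMAS AND PROOFS =====

-- the hyphen-collapsing pass, with the prev-emitted-was-hyphen flag as parameter
def pvCA : Bool → List Char → List Char
  | _, [] => []
  | b, c :: t =>
    if c = '-' then (if b then pvCA true t else '-' :: pvCA true t)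
    else c :: pvCA false t

theorem pvFoldB (l : List Char) (out : List Char) (prev : Bool) :
    (l.foldl (fun (st : List Char × Bool) ch =>
        if ch == '-' && st.2 then st else (st.1 ++ [ch], ch == '-'))
      (out, prev)).1 = out ++ pvCA prev l := by
  induction l generalizing out prev with
  | nil => simp [pvCA]
  | cons c t ih =>
    by_cases hc : c = '-'
    · subst hc
      cases prev with
      | true =>
        rw [List.foldl_cons, if_pos (by simp), ih]
        simp [pvCA]
      | false =>
        rw [List.foldl_cons, if_neg (by simp), ih]
        simp [pvCA]
    · have hb : (c == '-') = false := by simp [hc]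
      rw [List.foldl_cons, if_neg (by simp [hb]), hb, ih]
      simp [pvCA, hc]

theorem pvCA_repDD (l : List Char) : ∀ b, pvCA b (pvRepDD l) = pvCA b l := by
  induction l using pvRepDD.induct with
  | case1 => intro b; rfl
  | case2 c => intro b; rfl
  | case3 a b t hab ih =>
    intro fl
    obtain ⟨ha, hb⟩ := hab
    subst ha; subst hb
    simp [pvRepDD, pvCA, ih]
  | case4 a b t hab ih =>
    intro fl
    simp only [pvRepDD, hab, if_false]
    by_cases ha : a = '-'
    · simp [pvCA, ha, ih]
    · simp [pvCA, ha, ih]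

theorem pvCA_true_eq_false (t : List Char) (h : t.head? ≠ some '-') :
    pvCA true t = pvCA false t := by
  cases t with
  | nil => rfl
  | cons c t' =>
    have hc : c ≠ '-' := by simpa using h
    simp [pvCA, hc]

theorem pvCA_id (l : List Char) (h : pvDD l = false) : pvCA false l = l := by
  induction l with
  | nil => rfl
  | cons c t ih =>
    have ht : pvDD t = false := by
      cases t with
      | nil => rfl
      | cons d t' =>
        by_contra h'
        have : pvDD (d :: t') = true := by
          cases hdd : pvDD (d :: t') with
          | false => exact absurd hdd h'
          | true => rfl
        rw [show pvDD (c :: d :: t') = ((c = '-' && d = '-') || pvDD (d :: t')) from rfl,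
          this] at h
        simp at h
    by_cases hc : c = '-'
    · subst hc
      have hhd : t.head? ≠ some '-' := by
        cases t with
        | nil => simp
        | cons d t' =>
          simp only [List.head?_cons, ne_eq, Option.some.injEq]
          intro hd
          rw [show pvDD ('-' :: d :: t') = (('-' = '-' && d = '-') || pvDD (d :: t')) from rfl] at h
          simp [hd] at h
      rw [pvCA, if_pos rfl, pvCA_true_eq_false t hhd, ih ht]
      simp
    · rw [pvCA, if_neg hc, ih ht]

theorem pvWhileRep_eq_aux (n : Nat) : ∀ (l : List Char), l.length ≤ n →
    pvWhileRep (String.ofList l) = String.ofList (pvCA false l) := by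
  induction n with
  | zero =>
    intro l hl
    have : l = [] := List.eq_nil_of_length_eq_zero (Nat.le_zero.mp hl)
    subst this
    rw [pvWhileRep]
    rw [dif_neg (by decide)]
    rfl
  | succ n ih =>
    intro l hl
    rw [pvWhileRep]
    have htl : (String.ofList l).toList = l := by simp
    by_cases h : PySem.Str.isIn "--" (String.ofList l) = true
    · rw [dif_pos h]
      have hdd : pvDD l = true := by rw [pvIsIn_dd, htl] at h; exact h
      have hrepl : PySem.Str.replace (String.ofList l) "--" "-" = String.ofList (pvRepDD l) := by
        rw [PySem.Str.replace, htl]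
        have h2 : "--".toList = ['-', '-'] := by decide
        have h3 : "-".toList = ['-'] := by decide
        rw [h2, h3, pvReplace_dd_eq]
      have hlt : (pvRepDD l).length ≤ n := by
        have := pvRepDD_len_lt l hdd; omega
      rw [hrepl, ih _ hlt, pvCA_repDD]
    · rw [dif_neg h]
      have hdd : pvDD l = false := by
        rw [pvIsIn_dd, htl] at h
        cases hdd : pvDD l with
        | false => rfl
        | true => exact absurd hdd h
      rw [pvCA_id l hdd]

theorem pvWhileRep_eq (l : List Char) :
    pvWhileRep (String.ofList l) = String.ofList (pvCA false l) :=
  pvWhileRep_eq_aux l.length l le_rfl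

theorem pvCharOfNat_toNat (n : Nat) (h : n < 55296) : (Char.ofNat n).toNat = n := by
  have hv : n.isValidChar := Or.inl h
  rw [Char.ofNat, dif_pos hv]
  simp [Char.toNat, Char.ofNatAux]

theorem pvIsupper_lowerChar (a : Char) :
    PySem.Chars.isupper (PySem.Chars.lowerChar a) = false := by
  rw [PySem.Chars.lowerChar]
  by_cases h : PySem.Chars.isupper a = true
  · rw [if_pos h]
    rw [PySem.Chars.isupper] at h ⊢
    simp only [Bool.and_eq_true, decide_eq_true_eq] at h
    obtain ⟨h1, h2⟩ := h
    have hn1 : 65 ≤ a.toNat := Char.le_def.mp h1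
    have hn2 : a.toNat ≤ 90 := Char.le_def.mp h2
    have htn : (Char.ofNat (a.toNat + 32)).toNat = a.toNat + 32 :=
      pvCharOfNat_toNat _ (by omega)
    simp only [Bool.and_eq_false_iff, decide_eq_false_iff_not]
    right
    intro hle
    have h3 := Char.le_def.mp hle
    have h4 : (Char.ofNat (a.toNat + 32)).toNat ≤ 90 := UInt32.le_iff_toNat_le.mp h3
    omega
  · rw [if_neg h]
    simpa using h

theorem pvLowerChar_idem (a : Char) :
    PySem.Chars.lowerChar (PySem.Chars.lowerChar a) = PySem.Chars.lowerChar a := by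
  conv_lhs => rw [PySem.Chars.lowerChar]
  rw [pvIsupper_lowerChar]
  simp

-- single-character replace is a map
theorem pvGo_single_eq (fuel : Nat) (l acc : List Char) (h : l.length ≤ fuel) :
    PySem.Chars.replace.go ['_'] ['-'] fuel l acc
      = acc.reverse ++ l.map (fun c => if c = '_' then '-' else c) := by
  induction fuel generalizing l acc with
  | zero =>
    have : l = [] := List.eq_nil_of_length_eq_zero (Nat.le_zero.mp h)
    subst this; simp [PySem.Chars.replace.go]
  | succ fuel ih =>
    match l with
    | [] => simp [PySem.Chars.replace.go]
    | c :: t =>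
      by_cases hc : c = '_'
      · subst hc
        rw [PySem.Chars.replace.go]
        simp only [List.isPrefixOf, BEq.rfl, Bool.true_and, if_pos]
        rw [ih _ _ (by simpa using Nat.le_of_succ_le_succ h)]
        simp
      · rw [PySem.Chars.replace.go]
        have hpre : List.isPrefixOf ['_'] (c :: t) = false := by
          simp only [List.isPrefixOf, Bool.and_true, beq_eq_false_iff_ne, ne_eq]
          intro h'; exact hc h'.symm
        rw [hpre]
        simp only [Bool.false_eq_true, if_false]
        rw [ih _ _ (by simpa using Nat.le_of_succ_le_succ h)]
        simp [hc]

theorem pvReplace_single_eq (l : List Char) :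
    PySem.Chars.replace l ['_'] ['-'] = l.map (fun c => if c = '_' then '-' else c) := by
  rw [PySem.Chars.replace]
  simp only [List.isEmpty, Bool.false_eq_true, if_false]
  exact pvGo_single_eq l.length l [] le_rfl

-- every character of filename.lower().replace('_','-') is non-uppercase and lower-fixed
theorem pvNameChar (s : String) (c : Char)
    (hc : c ∈ (PySem.Str.replace (PySem.Str.lower s) "_" "-").toList) :
    PySem.Chars.isupper c = false ∧ PySem.Chars.lowerChar c = c := by
  rw [PySem.Str.toList_replace, PySem.Str.toList_lower] at hc
  have h2 : "_".toList = ['_'] := by decide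
  have h3 : "-".toList = ['-'] := by decide
  rw [h2, h3, pvReplace_single_eq, PySem.Chars.lower, List.map_map] at hc
  rcases List.mem_map.mp hc with ⟨a, _, rfl⟩
  simp only [Function.comp]
  by_cases ha : PySem.Chars.lowerChar a = '_'
  · rw [if_pos ha]; exact ⟨by decide, by decide⟩
  · rw [if_neg ha]
    exact ⟨pvIsupper_lowerChar a, pvLowerChar_idem a⟩

-- the camelCase loop of A is the identity on such a string
theorem pvCamel_id (s : String) :
    ((PySem.List.enumerate (PySem.Str.replace (PySem.Str.lower s) "_" "-").toList).foldl
      (fun acc p =>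
        (if decide (p.1 > 0) && PySem.Chars.isupper p.2 &&
            PySem.Chars.islower ((PySem.List.pyGet?
              (PySem.Str.replace (PySem.Str.lower s) "_" "-").toList (p.1 - 1)).getD ' ')
         then acc ++ ['-'] else acc) ++ [PySem.Chars.lowerChar p.2]) [])
      = (PySem.Str.replace (PySem.Str.lower s) "_" "-").toList := by
  rw [PySem.List.foldl_congr_mem _ _ (fun acc p => acc ++ [p.2]) []]
  · rw [PySem.List.foldl_append_singleton_eq_map (fun p : Int × Char => p.2)]
    rw [List.nil_append]
    exact PySem.List.map_snd_enumerate _ _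
  · intro acc p hp
    have hmem : p.2 ∈ (PySem.Str.replace (PySem.Str.lower s) "_" "-").toList := by
      rcases (PySem.List.mem_enumerate_iff _ _ _).mp hp with ⟨k, hk, rfl⟩
      exact List.getElem_mem hk
    obtain ⟨hup, hlow⟩ := pvNameChar s p.2 hmem
    rw [hup]
    simp [hlow]

-- ===== VERDICT (by name: the statement is the Claim_ definition above) =====
theorem get_new_filename_spec : Claim_equal_get_new_filename := by
  intro filename _
  unfold Spec_get_new_filename get_new_filename get_new_filename_alt
  have hset : pvSpecialSet.contains filename = pvSpecialNames.contains filename := by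
    rw [PySem.Set.contains_eq_listContains]
    rfl
  rw [hset]
  by_cases hs : pvSpecialNames.contains filename = true
  · rw [if_pos hs, if_pos hs]
  · rw [if_neg hs, if_neg hs]
    simp only [pvCamel_id, pvFoldB, pvWhileRep_eq, List.nil_append]
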